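-- pv_equiv track=rewrite | github.com/gboxo/bioagent_eval | examples/react_demo/data/M6_Transmembrane_Prediction/predict_tm_helices.py | count_tm_helices
-- ===== SOURCE A (Python) =====
-- def count_tm_helices(annotation: str) -> int:
--     """
--     Count transmembrane helices from TMHMM annotation string.
--     Transmembrane segments are marked as 'M' in the annotation.
--     """
--     # Count transitions from non-M to M (start of transmembrane region)
--     tm_count = 0
--     prev_char = None
--     for char in annotation:
--         if char == 'M' and prev_char != 'M':
--             tm_count += 1
--         prev_char = char
--
--     return tm_count
-- ===== SOURCE B (Python) =====
-- def count_tm_helices(annotation: str) -> int: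
--     """
--     Count transmembrane helices (maximal runs of 'M') by divide and conquer:
--     count runs in each half, subtract one when a single run spans the midpoint.
--     """
--     if len(annotation) <= 1:
--         return 1 if annotation == 'M' else 0
--     mid = len(annotation) // 2
--     left, right = annotation[:mid], annotation[mid:]
--     spans = 1 if left[-1] == 'M' and right[0] == 'M' else 0
--     return count_tm_helices(left) + count_tm_helices(right) - spans
-- ===== Notes on version B (the rewrite author's own statement) =====
-- stated objective: alternative
-- what changed: Replaced the single-pass prev-char transition loop with a divide-and-conquer recursion: count runs of 'M' in each half of the string and subtract one when a run spans the midpoint.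
import Mathlib
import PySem

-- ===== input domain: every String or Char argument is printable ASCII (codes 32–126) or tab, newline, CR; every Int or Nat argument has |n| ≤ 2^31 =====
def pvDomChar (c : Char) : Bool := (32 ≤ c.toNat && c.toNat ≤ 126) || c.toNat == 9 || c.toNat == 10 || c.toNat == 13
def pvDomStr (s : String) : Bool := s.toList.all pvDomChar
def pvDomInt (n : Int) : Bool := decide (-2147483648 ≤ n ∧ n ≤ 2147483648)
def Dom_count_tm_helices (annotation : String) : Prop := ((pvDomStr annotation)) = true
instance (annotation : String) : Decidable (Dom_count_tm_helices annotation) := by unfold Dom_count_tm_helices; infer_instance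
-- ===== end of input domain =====

-- B replaces A's single-pass prev-char transition loop by a divide-and-conquer recursion
-- (count runs in each half, subtract one when a run spans the midpoint); alternative, same result.


-- ===== PORT A =====
-- A's for-loop: state is (tm_count, prev_char)
def tmLoopA : List Char → Int → Option Char → Int
  | [], acc, _ => acc
  | c :: rest, acc, prev =>
      tmLoopA rest (if c = 'M' ∧ prev ≠ some 'M' then acc + 1 else acc) (some c)

def count_tm_helices (annotation : String) : Int :=
  tmLoopA annotation.toList 0 none

-- ===== PORT B =====
-- divide and conquer on the character list; left[-1]/right[0] are ported as
-- getLast?/head? compared with some 'M' — exact here since both halves are nonempty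
-- (len ≥ 2, so 1 ≤ mid < len).
def tmDC (l : List Char) : Int :=
  if l.length ≤ 1 then (if l = ['M'] then 1 else 0)
  else
    tmDC (l.take (l.length / 2)) + tmDC (l.drop (l.length / 2)) -
      (if (l.take (l.length / 2)).getLast? = some 'M' ∧
          (l.drop (l.length / 2)).head? = some 'M' then 1 else 0)
termination_by l.length
decreasing_by
  · simp only [List.length_take]; omega
  · simp only [List.length_drop]; omega

def count_tm_helices_alt (annotation : String) : Int :=
  tmDC annotation.toList

-- ===== PRECONDITION & SPEC =====
def Spec_count_tm_helices (annotation : String) (out : Int) : Prop := out = count_tm_helices_alt annotation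
instance (annotation : String) (out : Int) : Decidable (Spec_count_tm_helices annotation out) := by unfold Spec_count_tm_helices; infer_instance

-- ===== CLAIM (what is proved, stated in full; the proofs are below) =====
def Claim_equal_count_tm_helices : Prop := ∀ (annotation : String), Dom_count_tm_helices annotation → Spec_count_tm_helices annotation (count_tm_helices annotation)

-- ===== LEMMAS AND PROOFS =====

-- the accumulator is additive
theorem tmLoopA_acc (l : List Char) (acc : Int) (prev : Option Char) :
    tmLoopA l acc prev = acc + tmLoopA l 0 prev := by
  induction l generalizing acc prev with
  | nil => simp [tmLoopA]
  | cons c rest ih =>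
      simp only [tmLoopA]
      conv_lhs => rw [ih]
      conv_rhs => rw [ih]
      split_ifs <;> ring

-- splitting the loop at an append point
theorem tmLoopA_append (l r : List Char) (prev : Option Char) :
    tmLoopA (l ++ r) 0 prev =
      tmLoopA l 0 prev + tmLoopA r 0 (match l.getLast? with | some c => some c | none => prev) := by
  induction l generalizing prev with
  | nil => simp [tmLoopA]
  | cons c rest ih =>
      have hlast : (match (c :: rest).getLast? with | some e => some e | none => prev)
          = (match rest.getLast? with | some e => (some e : Option Char) | none => some c) := by
        cases rest with
        | nil => simp
        | cons d t =>
            rw [List.getLast?_cons_cons]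
            cases h : (d :: t).getLast? with
            | none => exact absurd (List.getLast?_eq_none_iff.mp h) (by simp)
            | some e => rfl
      simp only [List.cons_append, tmLoopA]
      conv_lhs => rw [tmLoopA_acc, ih]
      conv_rhs => rw [tmLoopA_acc, hlast]
      ring

-- forgetting a previous character costs exactly the head-run correction
theorem tmLoopA_forget (r : List Char) (c : Char) :
    tmLoopA r 0 (some c) =
      tmLoopA r 0 none - (if c = 'M' ∧ r.head? = some 'M' then 1 else 0) := by
  cases r with
  | nil => simp [tmLoopA]
  | cons x t =>
      simp only [tmLoopA, List.head?_cons]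
      conv_lhs => rw [tmLoopA_acc]
      conv_rhs => rw [tmLoopA_acc]
      by_cases hx : x = 'M' <;> by_cases hc : c = 'M' <;>
        simp [hx, hc] <;> try ring

-- divide-and-conquer computes the loop's value
theorem tmDC_eq (l : List Char) : tmDC l = tmLoopA l 0 none := by
  induction l using tmDC.induct with
  | case1 h =>
      rw [tmDC]
      simp [tmLoopA]
  | case2 l h hne =>
      rw [tmDC, if_pos h, if_neg hne]
      match l, h, hne with
      | [], _, _ => simp [tmLoopA]
      | [c], _, hne =>
          have hc : c ≠ 'M' := by intro h; exact hne (by rw [h])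
          simp [tmLoopA, hc]
  | case3 l h ih1 ih2 =>
      rw [tmDC, if_neg h, ih1, ih2]
      have hlen : ¬ l.length ≤ 1 := h
      have hmid1 : 1 ≤ l.length / 2 := by omega
      have hmidlt : l.length / 2 < l.length := by omega
      have hsplit : l = l.take (l.length / 2) ++ l.drop (l.length / 2) :=
        (List.take_append_drop _ l).symm
      conv_rhs => rw [hsplit]
      rw [tmLoopA_append]
      have hne : l.take (l.length / 2) ≠ [] := by
        intro hE
        have := congrArg List.length hE
        simp only [List.length_take, List.length_nil] at this
        omega
      cases hlast : (l.take (l.length / 2)).getLast? with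
      | none => exact absurd (List.getLast?_eq_none_iff.mp hlast) hne
      | some c =>
          simp only []
          rw [tmLoopA_forget]
          by_cases hcM : c = 'M' <;> simp [hcM] <;> try ring

-- ===== VERDICT (by name: the statement is the Claim_ definition above) =====
theorem count_tm_helices_spec : Claim_equal_count_tm_helices := by
  intro annotation _
  unfold Spec_count_tm_helices count_tm_helices count_tm_helices_alt
  exact (tmDC_eq annotation.toList).symm
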